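-- pv_equiv track=rewrite | github.com/Fondamenti18/fondamenti-di-programmazione | students/1764847/homework04/program01.py | createsTree
-- ===== SOURCE A (Python) =====
-- def createsTree(diz):
--     '''Restituisce un dizionario con chiave il valore del nodo
--     del nodo e come attributo la lista dei nodi da percorrere per
--     arrivare alla radice'''
--     lstKey = list(diz)
--     diz1 = {}
--     lst = []
--     j = 0
--     for i in diz:
--         c = lstKey[j]
--         j += 1
--         diz1[i] = fRic(c, diz, lst)
--         lst = []
--     return diz1
--
-- def fRic(n, diz, lst):
--     if not n in diz:
--         return lst
--     lst.append(diz[n])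
--     n = diz[n]
--     fRic(n,diz,lst)
--     return lst
-- ===== SOURCE B (Python) =====
-- def createsTree(diz):
--     # memoized: each node's path reuses its parent's already-computed path
--     memo = {}
--     def path(n):
--         if n in memo:
--             return memo[n]
--         if n not in diz:
--             return []
--         p = diz[n]
--         res = [p] + path(p)
--         memo[n] = res
--         return res
--     return {k: path(k) for k in diz}
-- ===== Notes on version B (the rewrite author's own statement) =====
-- stated objective: alternative
-- what changed: Instead of re-walking the ancestor chain from scratch for every key, B memoizes each node's path so a node's path is its parent plus the parent's cached path.
import Mathlib
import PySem

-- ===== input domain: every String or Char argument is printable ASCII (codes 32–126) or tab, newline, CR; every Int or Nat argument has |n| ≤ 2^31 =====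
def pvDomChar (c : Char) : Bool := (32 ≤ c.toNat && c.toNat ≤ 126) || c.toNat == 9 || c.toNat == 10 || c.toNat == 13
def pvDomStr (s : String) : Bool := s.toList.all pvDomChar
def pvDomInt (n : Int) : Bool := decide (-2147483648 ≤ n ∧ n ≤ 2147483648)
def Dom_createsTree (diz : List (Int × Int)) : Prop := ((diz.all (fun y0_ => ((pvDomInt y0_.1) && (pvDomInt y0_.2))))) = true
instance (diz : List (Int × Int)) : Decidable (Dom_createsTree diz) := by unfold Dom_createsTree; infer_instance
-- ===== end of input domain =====

-- B replaces A's per-key from-scratch recursive walk by a memoized walk that reuses the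
-- parent's already-computed path; equivalence is proved on acyclic, duplicate-free dicts.

-- ===== PORT A =====
-- fRic(n, diz, lst); the fuel argument only makes the (on cycles non-terminating) Python
-- recursion total — under Pre_ the chain exits the keys within diz.length steps, so the
-- fuel diz.length + 1 is never exhausted.
def fRicPort (d : PySem.Dict Int Int) : Nat → Int → List Int → List Int
  | 0, _, lst => lst
  | f + 1, n, lst =>
    match d.get? n with
    | none => lst
    | some v => fRicPort d f v (lst ++ [v])

def createsTree (diz : List (Int × Int)) : List (Int × List Int) :=
  let d : PySem.Dict Int Int := PySem.Dict.mk diz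
  -- lstKey = list(diz); for i in diz: c = lstKey[j]; j += 1  — so c is always i itself
  (d.keys.foldl (fun diz1 i => diz1.insert i (fRicPort d (d.size + 1) i []))
    (PySem.Dict.empty : PySem.Dict Int (List Int))).items

-- ===== PORT B =====
-- path(n) with the shared memo dict threaded through; same fuel remark as above.
def altPath (d : PySem.Dict Int Int) :
    Nat → PySem.Dict Int (List Int) → Int → List Int × PySem.Dict Int (List Int)
  | 0, memo, _ => ([], memo)
  | f + 1, memo, n =>
    match memo.get? n with
    | some l => (l, memo)
    | none =>
      match d.get? n with
      | none => ([], memo)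
      | some p =>
        let r := altPath d f memo p
        (p :: r.1, r.2.insert n (p :: r.1))

def createsTree_alt (diz : List (Int × Int)) : List (Int × List Int) :=
  let d : PySem.Dict Int Int := PySem.Dict.mk diz
  ((d.keys.foldl
      (fun (st : PySem.Dict Int (List Int) × PySem.Dict Int (List Int)) k =>
        let r := altPath d (d.size + 1) st.2 k
        (st.1.insert k r.1, r.2))
      (PySem.Dict.empty, PySem.Dict.empty)).1).items

-- ===== PRECONDITION & SPEC =====
-- Pre_ excludes (a) lists with duplicate keys, which a Python dict cannot contain (the
-- assoc-list representation is faithful only without them), and (b) cyclic parent maps, on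
-- which Python's fRic recurses forever (RecursionError).
def Pre_createsTree (diz : List (Int × Int)) : Prop :=
  (diz.map (·.1)).Nodup ∧
  ∀ p ∈ diz,
    ((fun n => (PySem.Dict.mk diz).getD n n)^[diz.length] p.1) ∉ diz.map (·.1)
instance (diz : List (Int × Int)) : Decidable (Pre_createsTree diz) := by
  unfold Pre_createsTree; infer_instance

def pvWitness_createsTree : (List (Int × Int)) := [(1, 2), (2, 3), (5, 1)]

def Spec_createsTree (diz : List (Int × Int)) (out : List (Int × List Int)) : Prop := out = createsTree_alt diz
instance (diz : List (Int × Int)) (out : List (Int × List Int)) : Decidable (Spec_createsTree diz out) := by unfold Spec_createsTree; infer_instance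

-- ===== CLAIM (what is proved, stated in full; the proofs are below) =====
def Claim_equal_createsTree : Prop := ∀ (diz : List (Int × Int)), Dom_createsTree diz → Pre_createsTree diz → Spec_createsTree diz (createsTree diz)

-- ===== LEMMAS AND PROOFS =====

-- canonical path of n: follow the parent map, one fuel per step
def chainP (d : PySem.Dict Int Int) : Nat → Int → List Int
  | 0, _ => []
  | f + 1, n =>
    match d.get? n with
    | none => []
    | some p => p :: chainP d f p

theorem fRicPort_eq_chainP (d : PySem.Dict Int Int) :
    ∀ (f : Nat) (n : Int) (lst : List Int), fRicPort d f n lst = lst ++ chainP d f n := by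
  intro f
  induction f with
  | zero => intro n lst; simp [fRicPort, chainP]
  | succ f ih =>
    intro n lst
    cases h : d.get? n with
    | none => simp [fRicPort, chainP, h]
    | some p => simp [fRicPort, chainP, h, ih]

theorem chainP_of_not_mem (d : PySem.Dict Int Int) (f : Nat) (n : Int)
    (h : n ∉ d.keys) : chainP d f n = [] := by
  cases f with
  | zero => rfl
  | succ f =>
    have : d.get? n = none := (PySem.Dict.get?_eq_none_iff_not_mem_keys d n).2 h
    simp [chainP, this]

theorem chainP_congr (d : PySem.Dict Int Int) :
    ∀ (j : Nat) (n : Int) (f g : Nat),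
      ((fun m => d.getD m m)^[j] n) ∉ d.keys → j ≤ f → j ≤ g →
      chainP d f n = chainP d g n := by
  intro j
  induction j with
  | zero =>
    intro n f g hout _ _
    simp only [Function.iterate_zero, id] at hout
    rw [chainP_of_not_mem d f n hout, chainP_of_not_mem d g n hout]
  | succ j ih =>
    intro n f g hout hf hg
    by_cases hn : n ∈ d.keys
    · have hsome : (d.get? n).isSome := by
        cases h : d.get? n with
        | none => exact absurd ((PySem.Dict.get?_eq_none_iff_not_mem_keys d n).1 h) (by simp [hn])
        | some p => simp
      obtain ⟨p, hp⟩ := Option.isSome_iff_exists.1 hsome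
      have hstep : d.getD n n = p := by
        simp [PySem.Dict.getD_eq_get?_getD, hp]
      have hout' : ((fun m => d.getD m m)^[j] p) ∉ d.keys := by
        rw [Function.iterate_succ_apply] at hout
        rwa [hstep] at hout
      obtain ⟨f', rfl⟩ := Nat.exists_eq_add_of_le hf
      obtain ⟨g', rfl⟩ := Nat.exists_eq_add_of_le hg
      have e1 : j + 1 + f' = (j + f') + 1 := by omega
      have e2 : j + 1 + g' = (j + g') + 1 := by omega
      rw [e1, e2]
      simp only [chainP, hp]
      rw [ih p (j + f') (j + g') hout' (by omega) (by omega)]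
    · rw [chainP_of_not_mem d f n hn, chainP_of_not_mem d g n hn]

-- under acyclicity every node exits the keys within d.size steps
theorem exit_exists (d : PySem.Dict Int Int)
    (hPre : ∀ k ∈ d.keys, ((fun m => d.getD m m)^[d.size] k) ∉ d.keys) (n : Int) :
    ∃ j ≤ d.size, ((fun m => d.getD m m)^[j] n) ∉ d.keys := by
  by_cases hn : n ∈ d.keys
  · exact ⟨d.size, le_refl _, hPre n hn⟩
  · exact ⟨0, Nat.zero_le _, by simpa using hn⟩

-- the canonical path: fuel d.size + 1 always suffices
theorem chainP_stable (d : PySem.Dict Int Int)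
    (hPre : ∀ k ∈ d.keys, ((fun m => d.getD m m)^[d.size] k) ∉ d.keys)
    (n : Int) (f : Nat) (hf : d.size ≤ f) :
    chainP d f n = chainP d (d.size + 1) n := by
  obtain ⟨j, hj, hout⟩ := exit_exists d hPre n
  exact chainP_congr d j n f (d.size + 1) hout (le_trans hj hf) (by omega)

def MemoInv (d : PySem.Dict Int Int) (memo : PySem.Dict Int (List Int)) : Prop :=
  ∀ (m : Int) (l : List Int), memo.get? m = some l → l = chainP d (d.size + 1) m

theorem altPath_spec (d : PySem.Dict Int Int)
    (hPre : ∀ k ∈ d.keys, ((fun m => d.getD m m)^[d.size] k) ∉ d.keys) :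
    ∀ (f : Nat) (memo : PySem.Dict Int (List Int)) (n : Int),
      MemoInv d memo → (∃ j ≤ f, ((fun m => d.getD m m)^[j] n) ∉ d.keys) →
      (altPath d f memo n).1 = chainP d (d.size + 1) n ∧ MemoInv d (altPath d f memo n).2 := by
  intro f
  induction f with
  | zero =>
    intro memo n hInv ⟨j, hj, hout⟩
    interval_cases j
    simp only [Function.iterate_zero, id] at hout
    refine ⟨?_, hInv⟩
    simp [altPath, chainP_of_not_mem d _ n hout]
  | succ f ih =>
    intro memo n hInv hex
    cases hm : memo.get? n with
    | some l =>
      constructor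
      · simp [altPath, hm, hInv n l hm]
      · simpa [altPath, hm] using hInv
    | none =>
      cases hd : d.get? n with
      | none =>
        have hnk : n ∉ d.keys := (PySem.Dict.get?_eq_none_iff_not_mem_keys d n).1 hd
        constructor
        · simp [altPath, hm, hd, chainP_of_not_mem d _ n hnk]
        · simpa [altPath, hm, hd] using hInv
      | some p =>
        have hnk : n ∈ d.keys := by
          by_contra h
          rw [(PySem.Dict.get?_eq_none_iff_not_mem_keys d n).2 h] at hd
          simp at hd
        -- extract an exit bound for p
        have hexp : ∃ j ≤ f, ((fun m => d.getD m m)^[j] p) ∉ d.keys := by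
          obtain ⟨j, hj, hout⟩ := hex
          cases j with
          | zero => exact absurd hnk (by simpa using hout)
          | succ j =>
            refine ⟨j, by omega, ?_⟩
            have hstep : d.getD n n = p := by
              simp [PySem.Dict.getD_eq_get?_getD, hd]
            rw [Function.iterate_succ_apply] at hout
            rwa [hstep] at hout
        obtain ⟨ih1, ih2⟩ := ih memo p hInv hexp
        -- d.size ≥ 1 since n ∈ d.keys
        have hsz : 1 ≤ d.size := by
          cases hdd : d.items with
          | nil => rw [show d.keys = d.items.map (·.1) from rfl, hdd] at hnk; simp at hnk
          | cons a t => simp [PySem.Dict.size, hdd]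
        have hCn : chainP d (d.size + 1) n = p :: chainP d (d.size + 1) p := by
          have : chainP d (d.size + 1) n = p :: chainP d d.size p := by
            simp [chainP, hd]
          rw [this, chainP_stable d hPre p d.size (le_refl _)]
        refine ⟨?_, ?_⟩
        · simp only [altPath, hm, hd]
          simp [ih1, hCn]
        · simp only [altPath, hm, hd]
          intro m l hml
          rw [PySem.Dict.get?_insert] at hml
          split_ifs at hml with hmn
          · subst hmn
            have h' : p :: (altPath d f memo p).1 = l := by simpa using hml
            rw [← h', ih1, hCn]
          · exact ih2 m l hml

theorem fold_alt_eq (d : PySem.Dict Int Int)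
    (hPre : ∀ k ∈ d.keys, ((fun m => d.getD m m)^[d.size] k) ∉ d.keys) :
    ∀ (l : List Int) (out : PySem.Dict Int (List Int)) (memo : PySem.Dict Int (List Int)),
      MemoInv d memo →
      (l.foldl
        (fun (st : PySem.Dict Int (List Int) × PySem.Dict Int (List Int)) k =>
          let r := altPath d (d.size + 1) st.2 k
          (st.1.insert k r.1, r.2)) (out, memo)).1 =
      l.foldl (fun dz k => dz.insert k (chainP d (d.size + 1) k)) out := by
  intro l
  induction l with
  | nil => intro out memo _; rfl
  | cons k t ih =>
    intro out memo hInv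
    have hex : ∃ j ≤ d.size + 1, ((fun m => d.getD m m)^[j] k) ∉ d.keys := by
      obtain ⟨j, hj, hout⟩ := exit_exists d hPre k
      exact ⟨j, by omega, hout⟩
    obtain ⟨h1, h2⟩ := altPath_spec d hPre (d.size + 1) memo k hInv hex
    simp only [List.foldl_cons]
    rw [show (altPath d (d.size + 1) memo k).1 = chainP d (d.size + 1) k from h1] at *
    exact ih (out.insert k (chainP d (d.size + 1) k)) _ h2

theorem ports_eq (d : PySem.Dict Int Int)
    (hPre' : ∀ k ∈ d.keys, ((fun m => d.getD m m)^[d.size] k) ∉ d.keys) :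
    (d.keys.foldl (fun diz1 i => diz1.insert i (fRicPort d (d.size + 1) i []))
      (PySem.Dict.empty : PySem.Dict Int (List Int))).items =
    ((d.keys.foldl
        (fun (st : PySem.Dict Int (List Int) × PySem.Dict Int (List Int)) k =>
          let r := altPath d (d.size + 1) st.2 k
          (st.1.insert k r.1, r.2))
        (PySem.Dict.empty, PySem.Dict.empty)).1).items := by
  have hInv0 : MemoInv d (PySem.Dict.empty : PySem.Dict Int (List Int)) := by
    intro m l h
    rw [PySem.Dict.get?_empty] at h
    simp at h
  congr 1
  rw [fold_alt_eq d hPre' d.keys PySem.Dict.empty PySem.Dict.empty hInv0]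
  apply PySem.List.foldl_congr_mem
  intro acc k _
  rw [fRicPort_eq_chainP d (d.size + 1) k [], List.nil_append]

-- ===== VERDICT (by name: the statement is the Claim_ definition above) =====
theorem createsTree_spec : Claim_equal_createsTree := by
  intro diz _hDom hPre
  show createsTree diz = createsTree_alt diz
  have hPre' : ∀ k ∈ (PySem.Dict.mk diz : PySem.Dict Int Int).keys,
      ((fun m => (PySem.Dict.mk diz : PySem.Dict Int Int).getD m m)^[(PySem.Dict.mk diz : PySem.Dict Int Int).size] k)
        ∉ (PySem.Dict.mk diz : PySem.Dict Int Int).keys := by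
    intro k hk
    have hk' : k ∈ diz.map (·.1) := hk
    obtain ⟨p, hp, rfl⟩ := List.mem_map.1 hk'
    exact hPre.2 p hp
  exact ports_eq (PySem.Dict.mk diz) hPre'
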